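-- pv_equiv track=rewrite | github.com/liuwei464976266/mygit | hpfgf.py | check_wu_dui_san_tiao
-- ===== SOURCE A (Python) =====
-- def check_wu_dui_san_tiao(hand):
--     """ 检测是不是4ge对子"""
--     frequencies = {}
--     frequencies_list = []
--     ranks = [i[2] for i in hand]
--     for rank in ranks:
--         if rank not in frequencies:
--             frequencies[rank] = 1
--         else:
--             frequencies[rank] += 1
--
--     for frequency in frequencies.values():
--         frequencies_list.append(int(frequency))
--
--     frequencies_list.sort()
--
--     if frequencies_list == [2,2,2,2,2,3] or frequencies_list == [2,2,2,3,4] or frequencies_list == [2,3,4,4]: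
--         return True
--     else:
--         return False
-- ===== SOURCE B (Python) =====
-- def check_wu_dui_san_tiao(hand):
--     """ 检测是不是4ge对子"""
--     ranks = [card[2] for card in hand]
--     vals = [ranks.count(r) for r in dict.fromkeys(ranks)]
--     n2, n3, n4 = vals.count(2), vals.count(3), vals.count(4)
--     return len(vals) == n2 + n3 + n4 and (n2, n3, n4) in {(5, 1, 0), (3, 1, 1), (1, 1, 2)}
-- ===== Notes on version B (the rewrite author's own statement) =====
-- stated objective: simpler
-- what changed: Instead of building a frequency dict, copying and sorting its values and comparing the sorted list to three fixed lists, B builds the per-rank counts directly (dedup + count) and classifies the hand by the histogram of those counts -- the triple (#2s,#3s,#4s) plus a length check -- against three fixed triples, removing the sort entirely.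
import Mathlib
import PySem

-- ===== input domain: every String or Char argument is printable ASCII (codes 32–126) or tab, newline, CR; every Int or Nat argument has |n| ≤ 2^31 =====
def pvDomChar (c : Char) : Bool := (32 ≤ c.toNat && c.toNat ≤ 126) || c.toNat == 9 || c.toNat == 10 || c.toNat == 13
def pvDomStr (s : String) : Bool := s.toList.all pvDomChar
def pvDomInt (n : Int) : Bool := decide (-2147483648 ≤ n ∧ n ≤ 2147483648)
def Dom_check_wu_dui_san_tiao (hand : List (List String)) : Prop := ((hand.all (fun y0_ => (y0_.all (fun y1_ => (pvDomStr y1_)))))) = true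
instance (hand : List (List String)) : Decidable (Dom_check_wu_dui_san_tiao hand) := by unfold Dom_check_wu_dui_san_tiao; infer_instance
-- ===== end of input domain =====

-- B replaces A's "sort the frequency values and compare to fixed sorted lists" by a
-- histogram-of-counts classification (count the 2s/3s/4s among the per-rank counts), removing the sort.


-- ===== PORT A =====
def check_wu_dui_san_tiao (hand : List (List String)) : Bool :=
  let ranks := hand.map (fun i => PySem.List.pyGetD i 2 "")
  let frequencies := ranks.foldl (fun d rank =>
      if d.contains rank = false then d.insert rank (1 : Int)
      else d.insert rank (d.getD rank 0 + 1)) PySem.Dict.empty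
  let frequencies_list := frequencies.values.foldl (fun acc f => acc ++ [f]) ([] : List Int)
  let fl := PySem.List.sorted frequencies_list (fun x => x) false
  if fl = [2, 2, 2, 2, 2, 3] ∨ fl = [2, 2, 2, 3, 4] ∨ fl = [2, 3, 4, 4] then true else false

-- ===== PORT B =====
def check_wu_dui_san_tiao_alt (hand : List (List String)) : Bool :=
  let ranks := hand.map (fun card => PySem.List.pyGetD card 2 "")
  let vals : List Int := (PySem.List.dedup ranks).map (fun r => (ranks.count r : Int))
  let n2 := vals.count 2
  let n3 := vals.count 3
  let n4 := vals.count 4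
  (vals.length == n2 + n3 + n4) &&
    ((n2, n3, n4) == (5, 1, 0) || (n2, n3, n4) == (3, 1, 1) || (n2, n3, n4) == (1, 1, 2))

-- ===== PRECONDITION & SPEC =====
-- Pre_ excludes exactly the hands containing a card with fewer than 3 fields, on which
-- Python A raises IndexError at card[2] (B raises there too).
def Pre_check_wu_dui_san_tiao (hand : List (List String)) : Prop := ∀ c ∈ hand, 2 < c.length
instance (hand : List (List String)) : Decidable (Pre_check_wu_dui_san_tiao hand) := by
  unfold Pre_check_wu_dui_san_tiao; infer_instance

def pvWitness_check_wu_dui_san_tiao : List (List String) := [["S", "x", "7"], ["H", "y", "7"]]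

def Spec_check_wu_dui_san_tiao (hand : List (List String)) (out : Bool) : Prop := out = check_wu_dui_san_tiao_alt hand
instance (hand : List (List String)) (out : Bool) : Decidable (Spec_check_wu_dui_san_tiao hand out) := by
  unfold Spec_check_wu_dui_san_tiao; infer_instance

-- ===== CLAIM (what is proved, stated in full; the proofs are below) =====
def Claim_equal_check_wu_dui_san_tiao : Prop := ∀ (hand : List (List String)), Dom_check_wu_dui_san_tiao hand → Pre_check_wu_dui_san_tiao hand → Spec_check_wu_dui_san_tiao hand (check_wu_dui_san_tiao hand)

-- ===== LEMMAS AND PROOFS =====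

-- A's counting loop (membership test, then insert 1 / increment) is the getD-increment loop.
theorem foldA_eq_counterFold (l : List String) (d : PySem.Dict String Int) :
    l.foldl (fun d rank =>
      if d.contains rank = false then d.insert rank (1 : Int)
      else d.insert rank (d.getD rank 0 + 1)) d
    = l.foldl (fun d x => d.insert x (d.getD x 0 + 1)) d := by
  induction l generalizing d with
  | nil => rfl
  | cons x t ih =>
    simp only [List.foldl_cons]
    by_cases h : d.contains x = false
    · rw [if_pos h, PySem.Dict.getD_of_not_contains d 0 h]
      norm_num [ih]
    · rw [if_neg h, ih]

-- The value list of Counter(xs) is exactly [xs.count r for r in dedup(xs)].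
theorem counter_values_eq (xs : List String) :
    (PySem.Dict.counter xs).values
      = (PySem.List.dedup xs).map (fun r => (xs.count r : Int)) := by
  show ((PySem.Dict.counter xs).items).map Prod.snd = _
  rw [PySem.Dict.items_counter]
  simp [List.map_map, Function.comp]

-- counts of 2, 3, 4 and of any fourth value are counts of disjoint elements
theorem count_sum_le (v : List Int) (a : Int) (h2 : a ≠ 2) (h3 : a ≠ 3) (h4 : a ≠ 4) :
    v.count 2 + v.count 3 + v.count 4 + v.count a ≤ v.length := by
  induction v with
  | nil => simp
  | cons x t ih =>
    simp only [List.count_cons, List.length_cons]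
    rcases eq_or_ne x 2 with hx2 | hx2 <;> rcases eq_or_ne x 3 with hx3 | hx3 <;>
      rcases eq_or_ne x 4 with hx4 | hx4 <;> rcases eq_or_ne x a with hxa | hxa <;>
      simp_all <;> omega

theorem pat_count_len (p : List Int) (h : ∀ x ∈ p, x = 2 ∨ x = 3 ∨ x = 4) :
    p.count 2 + p.count 3 + p.count 4 = p.length := by
  induction p with
  | nil => simp
  | cons x t ih =>
    have hx := h x (by simp)
    have ht : ∀ x ∈ t, x = 2 ∨ x = 3 ∨ x = 4 := fun y hy => h y (by simp [hy])
    simp only [List.count_cons, List.length_cons]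
    have hih := ih ht
    rcases hx with hx | hx | hx <;> subst hx <;> simp <;> omega

theorem sorted_eq_pattern_iff (v p : List Int) (hp : p.Pairwise (· ≤ ·))
    (hmem : ∀ x ∈ p, x = 2 ∨ x = 3 ∨ x = 4) :
    PySem.List.sorted v (fun x => x) false = p
      ↔ (v.count 2 = p.count 2 ∧ v.count 3 = p.count 3 ∧ v.count 4 = p.count 4 ∧
         v.length = p.length) := by
  constructor
  · intro h
    have hperm : v.Perm p := by
      have := PySem.List.sorted_perm v (fun x => x) false
      rw [h] at this
      exact this.symm
    exact ⟨hperm.count_eq 2, hperm.count_eq 3, hperm.count_eq 4, hperm.length_eq⟩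
  · rintro ⟨h2, h3, h4, hl⟩
    apply PySem.List.sorted_id_eq_of_perm_of_pairwise v p _ hp
    apply List.perm_iff_count.mpr
    intro a
    rcases eq_or_ne a 2 with rfl | ha2; · exact h2.symm
    rcases eq_or_ne a 3 with rfl | ha3; · exact h3.symm
    rcases eq_or_ne a 4 with rfl | ha4; · exact h4.symm
    have hpa : p.count a = 0 := by
      rw [List.count_eq_zero]
      intro hm
      rcases hmem a hm with h | h | h <;> simp_all
    have hle := count_sum_le v a ha2 ha3 ha4
    have hplen := pat_count_len p hmem
    omega

-- the sorted-list test against the three patterns equals the histogram test, over any value list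
theorem core_classify (v : List Int) :
    (if PySem.List.sorted v (fun x => x) false = [2, 2, 2, 2, 2, 3]
        ∨ PySem.List.sorted v (fun x => x) false = [2, 2, 2, 3, 4]
        ∨ PySem.List.sorted v (fun x => x) false = [2, 3, 4, 4] then true else false)
    = ((v.length == v.count 2 + v.count 3 + v.count 4) &&
        ((v.count 2, v.count 3, v.count 4) == (5, 1, 0)
          || (v.count 2, v.count 3, v.count 4) == (3, 1, 1)
          || (v.count 2, v.count 3, v.count 4) == (1, 1, 2))) := by
  have e1 := sorted_eq_pattern_iff v [2, 2, 2, 2, 2, 3] (by decide) (by decide)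
  have e2 := sorted_eq_pattern_iff v [2, 2, 2, 3, 4] (by decide) (by decide)
  have e3 := sorted_eq_pattern_iff v [2, 3, 4, 4] (by decide) (by decide)
  simp only [List.count_cons, List.count_nil, List.length_cons, List.length_nil] at e1 e2 e3
  norm_num at e1 e2 e3
  split_ifs with h
  · rcases h with h | h | h
    · rcases e1.mp h with ⟨c2, c3, c4, cl⟩
      simp [c2, c3, c4, cl]
    · rcases e2.mp h with ⟨c2, c3, c4, cl⟩
      simp [c2, c3, c4, cl]
    · rcases e3.mp h with ⟨c2, c3, c4, cl⟩
      simp [c2, c3, c4, cl]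
  · symm
    rw [Bool.eq_false_iff]
    intro hb
    simp only [Bool.and_eq_true, Bool.or_eq_true, beq_iff_eq, Prod.mk.injEq] at hb
    obtain ⟨hlen, hcase⟩ := hb
    apply h
    rcases hcase with (⟨c2, c3, c4⟩ | ⟨c2, c3, c4⟩) | ⟨c2, c3, c4⟩
    · exact Or.inl (e1.mpr ⟨c2, c3, c4, by omega⟩)
    · exact Or.inr (Or.inl (e2.mpr ⟨c2, c3, c4, by omega⟩))
    · exact Or.inr (Or.inr (e3.mpr ⟨c2, c3, c4, by omega⟩))

-- ===== VERDICT (by name: the statement is the Claim_ definition above) =====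
theorem check_wu_dui_san_tiao_spec : Claim_equal_check_wu_dui_san_tiao := by
  intro hand _ _
  unfold Spec_check_wu_dui_san_tiao check_wu_dui_san_tiao check_wu_dui_san_tiao_alt
  simp only [foldA_eq_counterFold, PySem.Dict.foldl_insert_getD_add_one_eq_counter,
    PySem.List.foldl_append_singleton, List.nil_append, counter_values_eq]
  exact core_classify _
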